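-- pv_equiv track=rewrite | github.com/JoonyeolDev/codingtest | Programers/lv2/프렌즈4블록.py | solution
-- ===== SOURCE A (Python) =====
-- def solution(m, n, board):
--     answer = 0
--     arr = []
--     for x in range(n):
--         char = []
--         for y in range(m):
--             char.append(board[m - y - 1][x])
--         arr.append(char)
--     directions = [(1, 0), (0, 1), (1, 1)]
--     while True:
--         visited = set()
--         row = len(arr)
--         for y in range(row - 1):
--             col = len(arr[y])
--             for x in range(col - 1):
--                 character = arr[y][x]
--                 temp_arr = [(y, x)]
--                 for dy, dx in directions:
--                     ny = y + dy
--                     nx = x + dx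
--                     if (
--                         0 <= ny < row
--                         and 0 <= nx < len(arr[ny])
--                         and arr[ny][nx] == character
--                     ):
--                         temp_arr.append((ny, nx))
--                 if len(temp_arr) == 4:
--                     for ny, nx in temp_arr:
--                         visited.add((ny, nx))
--         for y, row in enumerate(arr):
--             arr[y] = [value for x, value in enumerate(row) if (y, x) not in visited]
--         if not visited:
--             break
--         answer += len(visited)
--     return answer
-- ===== SOURCE B (Python) =====
-- def solution(m, n, board):
--     # B: keep the board in its original row orientation as a rectangular grid,
--     # mark removed cells with None and apply gravity per column each round.
--     if m <= 0 or n <= 0: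
--         return 0
--     grid = [list(board[r][:n]) for r in range(m)]
--     removed = 0
--     while True:
--         marks = set()
--         for r in range(m - 1):
--             for c in range(n - 1):
--                 v = grid[r][c]
--                 if v is not None and v == grid[r][c + 1] == grid[r + 1][c] == grid[r + 1][c + 1]:
--                     marks.update([(r, c), (r, c + 1), (r + 1, c), (r + 1, c + 1)])
--         if not marks:
--             return removed
--         removed += len(marks)
--         blanked = [[None if (r, c) in marks else grid[r][c] for c in range(n)] for r in range(m)]
--         cols = []
--         for c in range(n):
--             kept = [blanked[r][c] for r in range(m) if blanked[r][c] is not None]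
--             cols.append([None] * (m - len(kept)) + kept)
--         grid = [[cols[c][r] for c in range(n)] for r in range(m)]
-- ===== Notes on version B (the rewrite author's own statement) =====
-- stated objective: alternative
-- what changed: B keeps the board as a rectangular grid in its original row orientation with None as a removed-cell sentinel and an explicit per-column gravity pass each round, instead of A's rotated jagged column lists that delete cells physically.
import Mathlib
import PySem

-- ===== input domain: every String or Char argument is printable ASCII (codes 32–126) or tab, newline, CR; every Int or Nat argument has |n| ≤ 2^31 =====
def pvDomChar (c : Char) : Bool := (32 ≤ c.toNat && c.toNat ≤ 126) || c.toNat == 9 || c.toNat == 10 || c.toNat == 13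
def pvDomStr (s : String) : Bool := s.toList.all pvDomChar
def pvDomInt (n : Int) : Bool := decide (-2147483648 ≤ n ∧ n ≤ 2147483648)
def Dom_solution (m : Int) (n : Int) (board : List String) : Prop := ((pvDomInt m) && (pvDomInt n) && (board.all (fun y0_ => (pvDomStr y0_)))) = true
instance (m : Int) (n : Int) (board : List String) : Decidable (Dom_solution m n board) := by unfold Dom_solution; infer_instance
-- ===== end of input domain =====

-- B keeps the board as a rectangular grid in its original row orientation with a `none` sentinel
-- and an explicit per-column gravity pass, instead of A's rotated jagged column lists (alternative data structure).


-- ===== PORT A =====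
-- arr[x] is board column x read bottom-to-top: arr[x][y] = board[m-y-1][x]
def buildA (m : Int) (n : Int) (board : List String) : List (List Char) :=
  (PySem.List.pyRange 0 n 1).foldl (fun arr x =>
    arr ++ [(PySem.List.pyRange 0 m 1).foldl (fun ch y =>
      ch ++ [(PySem.Str.pyGet? (PySem.List.pyGetD board (m - y - 1) "") x).getD ' ']) []]) []

def dirsA : List (Int × Int) := [(1, 0), (0, 1), (1, 1)]

-- one round's `visited` set
def marksA (arr : List (List Char)) : PySem.Set (Int × Int) :=
  (PySem.List.pyRange 0 ((arr.length : Int) - 1) 1).foldl (fun vis y =>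
    (PySem.List.pyRange 0 (((PySem.List.pyGetD arr y []).length : Int) - 1) 1).foldl (fun vis x =>
      let character := PySem.List.pyGetD (PySem.List.pyGetD arr y []) x ' '
      let temp := dirsA.foldl (fun temp d =>
        let ny := y + d.1
        let nx := x + d.2
        if 0 ≤ ny ∧ ny < (arr.length : Int) ∧ 0 ≤ nx ∧
            nx < ((PySem.List.pyGetD arr ny []).length : Int) ∧
            PySem.List.pyGetD (PySem.List.pyGetD arr ny []) nx ' ' = character
        then temp ++ [(ny, nx)] else temp) [(y, x)]
      if temp.length = 4 then PySem.Set.update vis temp else vis) vis) PySem.Set.empty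

-- arr[y] = [value for x, value in enumerate(row) if (y, x) not in visited]
def removeA (arr : List (List Char)) (vis : PySem.Set (Int × Int)) : List (List Char) :=
  (PySem.List.enumerate arr).map (fun yr =>
    ((PySem.List.enumerate yr.2).filter (fun xv => decide ((yr.1, xv.1) ∉ vis))).map (fun xv => xv.2))

def loopA : Nat → List (List Char) → Int → Int
  | 0, _, answer => answer
  | fuel + 1, arr, answer =>
    let vis := marksA arr
    let arr' := removeA arr vis
    if vis = [] then answer
    else loopA fuel arr' (answer + (vis.length : Int))

def solution (m : Int) (n : Int) (board : List String) : Int :=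
  loopA (m.toNat * n.toNat + 1) (buildA m n board) 0

-- ===== PORT B =====
-- grid cell access grid[r][c]; a removed cell is `none` (all accesses are in range on Pre_)
def gB (grid : List (List (Option Char))) (r : Int) (c : Int) : Option Char :=
  PySem.List.pyGetD (PySem.List.pyGetD grid r []) c none

def buildB (m : Int) (n : Int) (board : List String) : List (List (Option Char)) :=
  (PySem.List.pyRange 0 m 1).map (fun r =>
    (PySem.List.slice (PySem.List.pyGetD board r "").toList none (some n)).map some)

def marksB (m : Int) (n : Int) (grid : List (List (Option Char))) : PySem.Set (Int × Int) :=
  (PySem.List.pyRange 0 (m - 1) 1).foldl (fun marks r =>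
    (PySem.List.pyRange 0 (n - 1) 1).foldl (fun marks c =>
      let v := gB grid r c
      if v ≠ none ∧ v = gB grid r (c + 1) ∧ v = gB grid (r + 1) c ∧ v = gB grid (r + 1) (c + 1)
      then PySem.Set.update marks [(r, c), (r, c + 1), (r + 1, c), (r + 1, c + 1)]
      else marks) marks) PySem.Set.empty

-- blanked = [[None if (r, c) in marks else grid[r][c] …]]; cols = per-column gravity; new grid = transpose back
def stepB (m : Int) (n : Int) (grid : List (List (Option Char))) (marks : PySem.Set (Int × Int)) :
    List (List (Option Char)) :=
  let blanked := (PySem.List.pyRange 0 m 1).map (fun r =>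
    (PySem.List.pyRange 0 n 1).map (fun c => if (r, c) ∈ marks then none else gB grid r c))
  let cols := (PySem.List.pyRange 0 n 1).foldl (fun cols c =>
    let kept := ((PySem.List.pyRange 0 m 1).filter (fun r => decide (gB blanked r c ≠ none))).map
      (fun r => gB blanked r c)
    cols ++ [PySem.List.pyRepeat [(none : Option Char)] (m - (kept.length : Int)) ++ kept]) []
  (PySem.List.pyRange 0 m 1).map (fun r => (PySem.List.pyRange 0 n 1).map (fun c => gB cols c r))

def loopB (m : Int) (n : Int) : Nat → List (List (Option Char)) → Int → Int
  | 0, _, removed => removed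
  | fuel + 1, grid, removed =>
    let marks := marksB m n grid
    if marks = [] then removed
    else loopB m n fuel (stepB m n grid marks) (removed + (marks.length : Int))

def solution_alt (m : Int) (n : Int) (board : List String) : Int :=
  if m ≤ 0 ∨ n ≤ 0 then 0
  else loopB m n (m.toNat * n.toNat + 1) (buildB m n board) 0

-- ===== PRECONDITION & SPEC =====
-- Pre_ excludes exactly the inputs where A raises IndexError: m,n positive but the board has
-- fewer than m rows or one of the first m rows is shorter than n.
def Pre_solution (m : Int) (n : Int) (board : List String) : Prop :=
  0 < m → 0 < n → m ≤ (board.length : Int) ∧ ∀ s ∈ board.take m.toNat, n ≤ (s.toList.length : Int)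
instance (m : Int) (n : Int) (board : List String) : Decidable (Pre_solution m n board) := by
  unfold Pre_solution; infer_instance

def pvWitness_solution : Int × Int × List String := (2, 2, ["AA", "AA"])

def Spec_solution (m : Int) (n : Int) (board : List String) (out : Int) : Prop := out = solution_alt m n board
instance (m : Int) (n : Int) (board : List String) (out : Int) : Decidable (Spec_solution m n board out) := by unfold Spec_solution; infer_instance

-- ===== CLAIM (what is proved, stated in full; the proofs are below) =====
def Claim_equal_solution : Prop := ∀ (m : Int) (n : Int) (board : List String), Dom_solution m n board → Pre_solution m n board → Spec_solution m n board (solution m n board)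

-- ===== LEMMAS AND PROOFS =====

-- abstraction: B's grid is a function of A's column lists
def chA (arr : List (List Char)) (y x : Int) : Char :=
  PySem.List.pyGetD (PySem.List.pyGetD arr y []) x ' '

def kA (arr : List (List Char)) (y : Int) : Int := ((PySem.List.pyGetD arr y []).length : Int)

def cellI (m : Int) (arr : List (List Char)) (r c : Int) : Option Char :=
  PySem.List.pyGet? (PySem.List.pyGetD arr c []) (m - 1 - r)

def growI (m n : Int) (arr : List (List Char)) : List (List (Option Char)) :=
  (PySem.List.pyRange 0 m 1).map (fun r => (PySem.List.pyRange 0 n 1).map (fun c => cellI m arr r c))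

def InvI (m n : Int) (arr : List (List Char)) (grid : List (List (Option Char))) : Prop :=
  ((arr.length : Int) = n) ∧ (∀ col ∈ arr, (col.length : Int) ≤ m) ∧ grid = growI m n arr

def condA (arr : List (List Char)) (y x : Int) : Prop :=
  0 ≤ y ∧ y + 1 < (arr.length : Int) ∧ 0 ≤ x ∧
  x + 1 < ((PySem.List.pyGetD arr y []).length : Int) ∧
  x + 1 < ((PySem.List.pyGetD arr (y + 1) []).length : Int) ∧
  chA arr y (x + 1) = chA arr y x ∧ chA arr (y + 1) x = chA arr y x ∧
  chA arr (y + 1) (x + 1) = chA arr y x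

def ptsA (y x : Int) : List (Int × Int) := [(y, x), (y + 1, x), (y, x + 1), (y + 1, x + 1)]

def condB (m n : Int) (arr : List (List Char)) (r c : Int) : Prop :=
  0 ≤ r ∧ r + 1 < m ∧ 0 ≤ c ∧ c + 1 < n ∧ cellI m arr r c ≠ none ∧
  cellI m arr r c = cellI m arr r (c + 1) ∧ cellI m arr r c = cellI m arr (r + 1) c ∧
  cellI m arr r c = cellI m arr (r + 1) (c + 1)

def ptsB (r c : Int) : List (Int × Int) := [(r, c), (r, c + 1), (r + 1, c), (r + 1, c + 1)]

def phi (m : Int) (q : Int × Int) : Int × Int := (m - 1 - q.2, q.1)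

-- generic facts about accumulating folds over a PySem.Set
theorem mem_foldl_grow {α P : Type} [BEq P] [LawfulBEq P] (l : List α)
    (g : PySem.Set P → α → PySem.Set P) (Q : α → P → Prop)
    (h : ∀ s y, y ∈ l → ∀ p, (p ∈ g s y ↔ p ∈ s ∨ Q y p)) :
    ∀ s p, (p ∈ l.foldl g s ↔ p ∈ s ∨ ∃ y ∈ l, Q y p) := by
  induction l with
  | nil => intro s p; simp
  | cons a t ih =>
    intro s p
    rw [List.foldl_cons, ih (fun s y hy p => h s y (List.mem_cons_of_mem a hy) p),
      h s a (List.mem_cons_self) p]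
    simp only [List.mem_cons]
    constructor
    · rintro ((hp | hq) | ⟨y, hy, hQ⟩)
      · exact Or.inl hp
      · exact Or.inr ⟨a, Or.inl rfl, hq⟩
      · exact Or.inr ⟨y, Or.inr hy, hQ⟩
    · rintro (hp | ⟨y, rfl | hy, hQ⟩)
      · exact Or.inl (Or.inl hp)
      · exact Or.inl (Or.inr hQ)
      · exact Or.inr ⟨y, hy, hQ⟩

theorem nodup_foldl_grow {α P : Type} [BEq P] (l : List α)
    (g : PySem.Set P → α → PySem.Set P)
    (h : ∀ s y, List.Nodup s → List.Nodup (g s y)) :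
    ∀ s, List.Nodup s → List.Nodup (l.foldl g s) := by
  induction l with
  | nil => intro s hs; simpa using hs
  | cons a t ih =>
    intro s hs
    rw [List.foldl_cons]
    exact ih _ (h s a hs)

-- grid built as a rectangular map-of-ranges: access is pointwise
theorem gB_map_map (m n : Int) (f : Int → Int → Option Char) (r c : Int)
    (hr0 : 0 ≤ r) (hrm : r < m) (hc0 : 0 ≤ c) (hcn : c < n) :
    gB ((PySem.List.pyRange 0 m 1).map (fun r =>
      (PySem.List.pyRange 0 n 1).map (fun c => f r c))) r c = f r c := by
  unfold gB
  have hm' : m = ((m.toNat : Nat) : Int) := by omega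
  have hr' : r = ((r.toNat : Nat) : Int) := by omega
  have hn' : n = ((n.toNat : Nat) : Int) := by omega
  have hc' : c = ((c.toNat : Nat) : Int) := by omega
  rw [hm', hr', hn', hc', PySem.List.pyGetD_map_pyRange _ m.toNat r.toNat _ (by omega),
    PySem.List.pyGetD_map_pyRange _ n.toNat c.toNat _ (by omega)]

-- cellI facts
theorem cellI_char (m : Int) (arr : List (List Char)) (r c : Int)
    (h0 : 0 ≤ m - 1 - r) (h1 : m - 1 - r < kA arr c) :
    cellI m arr r c = some (chA arr c (m - 1 - r)) := by
  unfold cellI chA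
  have hj : m - 1 - r = (((m - 1 - r).toNat : Nat) : Int) := by omega
  rw [hj, PySem.List.pyGet?_natCast, PySem.List.pyGetD_natCast]
  unfold kA at h1
  rw [List.getElem?_eq_getElem (by omega)]
  congr 1
  exact (List.getD_eq_getElem _ _ (by omega)).symm

theorem cellI_ne_none_iff (m : Int) (arr : List (List Char)) (r c : Int)
    (h0 : 0 ≤ m - 1 - r) :
    (cellI m arr r c ≠ none ↔ m - 1 - r < kA arr c) := by
  unfold cellI kA
  have hj : m - 1 - r = (((m - 1 - r).toNat : Nat) : Int) := by omega
  rw [hj, PySem.List.pyGet?_natCast]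
  constructor
  · intro h
    by_contra hk
    have : ((PySem.List.pyGetD arr c [])[(m - 1 - r).toNat]? = none) :=
      List.getElem?_eq_none (by omega)
    exact h this
  · intro hk h
    rw [List.getElem?_eq_getElem (by omega)] at h
    simp at h

theorem kA_le (m n : Int) (arr : List (List Char)) (grid : List (List (Option Char)))
    (hInv : InvI m n arr grid) (y : Int) (hy0 : 0 ≤ y) (hyn : y < n) : kA arr y ≤ m := by
  unfold kA
  rw [PySem.List.pyGetD_eq_getElem arr [] hy0 (by rw [hInv.1]; omega)]
  exact hInv.2.1 _ (List.getElem_mem _)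

-- membership characterisation of A's visited set
theorem mem_marksA (arr : List (List Char)) (p : Int × Int) :
    p ∈ marksA arr ↔ ∃ y x, condA arr y x ∧ p ∈ ptsA y x := by
  unfold marksA
  refine Iff.trans (mem_foldl_grow _ _
      (fun y p => ∃ x, condA arr y x ∧ p ∈ ptsA y x) ?_ PySem.Set.empty p) ?_
  · intro s y hy q
    refine Iff.trans (mem_foldl_grow _ _
        (fun x q => condA arr y x ∧ q ∈ ptsA y x) ?_ s q) ?_
    · intro s' x hx q'
      rw [PySem.List.mem_pyRange_one] at hy hx
      simp only [dirsA, List.foldl_cons, List.foldl_nil, add_zero]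
      by_cases hc1 : 0 ≤ y + 1 ∧ y + 1 < (arr.length : Int) ∧ 0 ≤ x ∧
          x < ((PySem.List.pyGetD arr (y + 1) []).length : Int) ∧
          PySem.List.pyGetD (PySem.List.pyGetD arr (y + 1) []) x ' ' =
            PySem.List.pyGetD (PySem.List.pyGetD arr y []) x ' ' <;>
        by_cases hc2 : 0 ≤ y ∧ y < (arr.length : Int) ∧ 0 ≤ x + 1 ∧
          x + 1 < ((PySem.List.pyGetD arr y []).length : Int) ∧
          PySem.List.pyGetD (PySem.List.pyGetD arr y []) (x + 1) ' ' =
            PySem.List.pyGetD (PySem.List.pyGetD arr y []) x ' ' <;>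
        by_cases hc3 : 0 ≤ y + 1 ∧ y + 1 < (arr.length : Int) ∧ 0 ≤ x + 1 ∧
          x + 1 < ((PySem.List.pyGetD arr (y + 1) []).length : Int) ∧
          PySem.List.pyGetD (PySem.List.pyGetD arr (y + 1) []) (x + 1) ' ' =
            PySem.List.pyGetD (PySem.List.pyGetD arr y []) x ' ' <;>
      skip
      all_goals (first | rw [if_pos hc1] | rw [if_neg hc1])
      all_goals (first | rw [if_pos hc2] | rw [if_neg hc2])
      all_goals (first | rw [if_pos hc3] | rw [if_neg hc3])
      · -- all three neighbour checks pass: the block is marked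
        have hcond : condA arr y x := by
          refine ⟨by omega, by omega, by omega, by omega, by omega, ?_, ?_, ?_⟩
          · exact hc2.2.2.2.2
          · exact hc1.2.2.2.2
          · exact hc3.2.2.2.2
        rw [if_pos (by simp), PySem.Set.mem_update]
        simp only [ptsA, List.mem_append, List.mem_cons, List.mem_singleton,
          List.not_mem_nil, or_false]
        tauto
      all_goals
        rw [if_neg (by simp)]
        have hcond : ¬ condA arr y x := by
          intro hco
          obtain ⟨h1, h2, h3, h4, h5, h6, h7, h8⟩ := hco
          first
          | exact absurd ⟨by omega, by omega, by omega, by omega, h7⟩ hc1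
          | exact absurd ⟨by omega, by omega, by omega, by omega, h6⟩ hc2
          | exact absurd ⟨by omega, by omega, by omega, by omega, h8⟩ hc3
        tauto
    · constructor
      · rintro (hq | ⟨x, _, hc, hm⟩)
        · exact Or.inl hq
        · exact Or.inr ⟨x, hc, hm⟩
      · rintro (hq | ⟨x, hc, hm⟩)
        · exact Or.inl hq
        · refine Or.inr ⟨x, ?_, hc, hm⟩
          rw [PySem.List.mem_pyRange_one]
          obtain ⟨_, _, h3, h4, _⟩ := hc
          exact ⟨h3, by omega⟩
  · constructor
    · rintro (hp | ⟨y, _, x, hc, hm⟩)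
      · simp [PySem.Set.empty] at hp
      · exact ⟨y, x, hc, hm⟩
    · rintro ⟨y, x, hc, hm⟩
      refine Or.inr ⟨y, ?_, x, hc, hm⟩
      rw [PySem.List.mem_pyRange_one]
      obtain ⟨h1, h2, _⟩ := hc
      exact ⟨h1, by omega⟩

theorem nodup_marksA (arr : List (List Char)) : (marksA arr).Nodup := by
  unfold marksA
  refine nodup_foldl_grow _ _ ?_ _ List.nodup_nil
  intro s y hs
  refine nodup_foldl_grow _ _ ?_ _ hs
  intro s' x hs'
  dsimp only
  split
  · exact PySem.Set.nodup_update _ _ hs'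
  · exact hs'

-- membership characterisation of B's marks set
theorem mem_marksB (m n : Int) (arr : List (List Char)) (grid : List (List (Option Char)))
    (hInv : InvI m n arr grid) (p : Int × Int) :
    p ∈ marksB m n grid ↔ ∃ r c, condB m n arr r c ∧ p ∈ ptsB r c := by
  obtain ⟨hlen, hcols, hgrid⟩ := hInv
  subst hgrid
  unfold marksB
  refine Iff.trans (mem_foldl_grow _ _
      (fun r p => ∃ c, condB m n arr r c ∧ p ∈ ptsB r c) ?_ PySem.Set.empty p) ?_
  · intro s r hr q
    refine Iff.trans (mem_foldl_grow _ _
        (fun c q => condB m n arr r c ∧ q ∈ ptsB r c) ?_ s q) ?_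
    · intro s' c hc q'
      rw [PySem.List.mem_pyRange_one] at hr hc
      simp only [growI,
        gB_map_map m n _ r c (by omega) (by omega) (by omega) (by omega),
        gB_map_map m n _ r (c + 1) (by omega) (by omega) (by omega) (by omega),
        gB_map_map m n _ (r + 1) c (by omega) (by omega) (by omega) (by omega),
        gB_map_map m n _ (r + 1) (c + 1) (by omega) (by omega) (by omega) (by omega)]
      by_cases hcb : condB m n arr r c
      · rw [if_pos ⟨hcb.2.2.2.2.1, hcb.2.2.2.2.2.1, hcb.2.2.2.2.2.2.1, hcb.2.2.2.2.2.2.2⟩,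
          PySem.Set.mem_update]
        unfold ptsB
        tauto
      · rw [if_neg ?_]
        · tauto
        · intro hco
          exact hcb ⟨by omega, by omega, by omega, by omega,
            hco.1, hco.2.1, hco.2.2.1, hco.2.2.2⟩
    · constructor
      · rintro (hq | ⟨c, _, hcb, hm⟩)
        · exact Or.inl hq
        · exact Or.inr ⟨c, hcb, hm⟩
      · rintro (hq | ⟨c, hcb, hm⟩)
        · exact Or.inl hq
        · refine Or.inr ⟨c, ?_, hcb, hm⟩
          rw [PySem.List.mem_pyRange_one]
          exact ⟨hcb.2.2.1, by have := hcb.2.2.2.1; omega⟩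
  · constructor
    · rintro (hp | ⟨r, _, c, hcb, hm⟩)
      · simp [PySem.Set.empty] at hp
      · exact ⟨r, c, hcb, hm⟩
    · rintro ⟨r, c, hcb, hm⟩
      refine Or.inr ⟨r, ?_, c, hcb, hm⟩
      rw [PySem.List.mem_pyRange_one]
      exact ⟨hcb.1, by have := hcb.2.1; omega⟩

theorem nodup_marksB (m n : Int) (grid : List (List (Option Char))) :
    (marksB m n grid).Nodup := by
  unfold marksB
  refine nodup_foldl_grow _ _ ?_ _ List.nodup_nil
  intro s r hs
  refine nodup_foldl_grow _ _ ?_ _ hs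
  intro s' c hs'
  dsimp only
  split
  · exact PySem.Set.nodup_update _ _ hs'
  · exact hs'

-- the mark sets correspond under phi
theorem mem_marksB_iff_phi (m n : Int) (arr : List (List Char)) (grid : List (List (Option Char)))
    (hInv : InvI m n arr grid) (p : Int × Int) :
    p ∈ marksB m n grid ↔ ∃ q ∈ marksA arr, p = phi m q := by
  rw [mem_marksB m n arr grid hInv p]
  obtain ⟨hlen, hcols, -⟩ := hInv
  constructor
  · rintro ⟨r, c, hcb, hm⟩
    obtain ⟨h1, h2, h3, h4, h5, h6, h7, h8⟩ := hcb
    have hx0 : (0:Int) ≤ m - 1 - r := by omega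
    have hx1 : (0:Int) ≤ m - 1 - (r + 1) := by omega
    have hkc : m - 1 - r < kA arr c := (cellI_ne_none_iff m arr r c hx0).mp h5
    have hkc1 : m - 1 - r < kA arr (c + 1) :=
      (cellI_ne_none_iff m arr r (c + 1) hx0).mp (by rw [← h6]; exact h5)
    have hkc' : m - 1 - (r + 1) < kA arr c :=
      (cellI_ne_none_iff m arr (r + 1) c hx1).mp (by rw [← h7]; exact h5)
    have hkc1' : m - 1 - (r + 1) < kA arr (c + 1) :=
      (cellI_ne_none_iff m arr (r + 1) (c + 1) hx1).mp (by rw [← h8]; exact h5)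
    have e1 : cellI m arr r c = some (chA arr c (m - 1 - r)) := cellI_char _ _ _ _ hx0 hkc
    have e2 : cellI m arr r (c + 1) = some (chA arr (c + 1) (m - 1 - r)) :=
      cellI_char _ _ _ _ hx0 hkc1
    have e3 : cellI m arr (r + 1) c = some (chA arr c (m - 1 - (r + 1))) :=
      cellI_char _ _ _ _ hx1 hkc'
    have e4 : cellI m arr (r + 1) (c + 1) = some (chA arr (c + 1) (m - 1 - (r + 1))) :=
      cellI_char _ _ _ _ hx1 hkc1'
    have q1 : chA arr (c + 1) (m - 1 - r) = chA arr c (m - 1 - r) := by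
      have h := h6; rw [e1, e2] at h; exact (Option.some.inj h).symm
    have q2 : chA arr c (m - 1 - (r + 1)) = chA arr c (m - 1 - r) := by
      have h := h7; rw [e1, e3] at h; exact (Option.some.inj h).symm
    have q3 : chA arr (c + 1) (m - 1 - (r + 1)) = chA arr c (m - 1 - r) := by
      have h := h8; rw [e1, e4] at h; exact (Option.some.inj h).symm
    unfold kA at hkc hkc1 hkc' hkc1'
    have hcond : condA arr c (m - 2 - r) := by
      refine ⟨h3, by omega, by omega, by omega, by omega, ?_, ?_, ?_⟩
      · rw [show m - 2 - r + 1 = m - 1 - r from by omega,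
          show m - 2 - r = m - 1 - (r + 1) from by omega]
        exact q2.symm
      · rw [show m - 2 - r = m - 1 - (r + 1) from by omega]
        exact q3.trans q2.symm
      · rw [show m - 2 - r + 1 = m - 1 - r from by omega,
          show m - 2 - r = m - 1 - (r + 1) from by omega]
        exact q1.trans q2.symm
    have hmem : ∀ q ∈ ptsA c (m - 2 - r), q ∈ marksA arr := by
      intro q hq
      rw [mem_marksA]
      exact ⟨c, m - 2 - r, hcond, hq⟩
    simp only [ptsB, List.mem_cons, List.not_mem_nil, or_false] at hm
    rcases hm with rfl | rfl | rfl | rfl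
    · exact ⟨(c, m - 2 - r + 1), hmem _ (by simp [ptsA]), by simp [phi, Prod.ext_iff]; omega⟩
    · exact ⟨(c + 1, m - 2 - r + 1), hmem _ (by simp [ptsA]), by simp [phi, Prod.ext_iff]; omega⟩
    · exact ⟨(c, m - 2 - r), hmem _ (by simp [ptsA]), by simp [phi, Prod.ext_iff]; omega⟩
    · exact ⟨(c + 1, m - 2 - r), hmem _ (by simp [ptsA]), by simp [phi, Prod.ext_iff]; omega⟩
  · rintro ⟨q, hq, rfl⟩
    rw [mem_marksA] at hq
    obtain ⟨y, x, hcA, hqm⟩ := hq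
    obtain ⟨h1, h2, h3, h4, h5, h6, h7, h8⟩ := hcA
    have hky : kA arr y ≤ m := kA_le m n arr (growI m n arr) ⟨hlen, hcols, rfl⟩ y h1 (by omega)
    have hky1 : kA arr (y + 1) ≤ m := kA_le m n arr (growI m n arr) ⟨hlen, hcols, rfl⟩ (y + 1)
      (by omega) (by omega)
    unfold kA at hky hky1
    refine ⟨m - 2 - x, y, ?_, ?_⟩
    · have i1 : m - 1 - (m - 2 - x) = x + 1 := by omega
      have i2 : m - 1 - (m - 2 - x + 1) = x := by omega
      have e1 : cellI m arr (m - 2 - x) y = some (chA arr y (x + 1)) := by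
        rw [cellI_char _ _ _ _ (by omega) (by unfold kA; omega), i1]
      have e2 : cellI m arr (m - 2 - x) (y + 1) = some (chA arr (y + 1) (x + 1)) := by
        rw [cellI_char _ _ _ _ (by omega) (by unfold kA; omega), i1]
      have e3 : cellI m arr (m - 2 - x + 1) y = some (chA arr y x) := by
        rw [cellI_char _ _ _ _ (by omega) (by unfold kA; omega), i2]
      have e4 : cellI m arr (m - 2 - x + 1) (y + 1) = some (chA arr (y + 1) x) := by
        rw [cellI_char _ _ _ _ (by omega) (by unfold kA; omega), i2]
      refine ⟨by omega, by omega, h1, by omega, ?_, ?_, ?_, ?_⟩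
      · rw [e1]; simp
      · rw [e1, e2, h6, h8]
      · rw [e1, e3, h6]
      · rw [e1, e4, h6, h7]
    · simp only [ptsA, List.mem_cons, List.not_mem_nil, or_false] at hqm
      simp only [ptsB, List.mem_cons, List.not_mem_nil, or_false]
      rcases hqm with rfl | rfl | rfl | rfl
      · right; right; left; simp [phi, Prod.ext_iff]; omega
      · right; right; right; simp [phi, Prod.ext_iff]; omega
      · left; simp [phi, Prod.ext_iff]; omega
      · right; left; simp [phi, Prod.ext_iff]; omega

theorem phi_injective (m : Int) : Function.Injective (phi m) := by
  intro a b h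
  unfold phi at h
  rw [Prod.ext_iff] at h ⊢
  obtain ⟨h1, h2⟩ := h
  exact ⟨h2, by omega⟩

theorem marksB_perm (m n : Int) (arr : List (List Char)) (grid : List (List (Option Char)))
    (hInv : InvI m n arr grid) :
    (marksB m n grid).Perm ((marksA arr).map (phi m)) := by
  refine (List.perm_ext_iff_of_nodup (nodup_marksB m n grid)
    (List.Nodup.map (phi_injective m) (nodup_marksA arr))).mpr ?_
  intro a
  rw [mem_marksB_iff_phi m n arr grid hInv a, List.mem_map]
  constructor
  · rintro ⟨q, hq, rfl⟩; exact ⟨q, hq, rfl⟩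
  · rintro ⟨q, hq, rfl⟩; exact ⟨q, hq, rfl⟩

theorem marksB_length (m n : Int) (arr : List (List Char)) (grid : List (List (Option Char)))
    (hInv : InvI m n arr grid) :
    (marksB m n grid).length = (marksA arr).length := by
  rw [(marksB_perm m n arr grid hInv).length_eq, List.length_map]

theorem marksB_nil_iff (m n : Int) (arr : List (List Char)) (grid : List (List (Option Char)))
    (hInv : InvI m n arr grid) :
    (marksB m n grid = [] ↔ marksA arr = []) := by
  rw [← List.length_eq_zero_iff, ← List.length_eq_zero_iff,
    marksB_length m n arr grid hInv]

-- removeA in closed form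
theorem removeA_eq (arr : List (List Char)) (vis : PySem.Set (Int × Int)) :
    removeA arr vis = (PySem.List.pyRange 0 ((arr.length : Int)) 1).map (fun y =>
      ((PySem.List.pyRange 0 (kA arr y) 1).filter (fun j => decide ((y, j) ∉ vis))).map
        (fun j => chA arr y j)) := by
  unfold removeA
  rw [PySem.List.enumerate_eq_map_pyRange arr [], List.map_map]
  have hlen : PySem.List.len arr = (arr.length : Int) := by simp [PySem.List.len]
  rw [hlen]
  refine List.map_congr_left ?_
  intro y hy
  dsimp only [Function.comp]
  rw [PySem.List.enumerate_eq_map_pyRange (PySem.List.pyGetD arr y []) ' ',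
    List.filter_map, List.map_map]
  have hlen2 : PySem.List.len (PySem.List.pyGetD arr y []) = kA arr y := by
    simp [PySem.List.len, kA]
  rw [hlen2]
  rfl

-- index-reversal: scanning rows top-down over a bottom-up column
theorem rev_filter_range {β : Type} (M k : Nat) (h : k ≤ M) (p : Nat → Bool) (f : Nat → β) :
    ((List.range M).filter (fun r => decide (M - 1 - r < k) && p (M - 1 - r))).map
      (fun r => f (M - 1 - r))
    = (((List.range k).filter p).map f).reverse := by
  obtain ⟨d, rfl⟩ : ∃ d, M = k + d := ⟨M - k, by omega⟩
  have hrev : (List.range (k + d)).reverse = (List.range (k + d)).map (fun i => k + d - 1 - i) := by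
    rw [List.range_eq_range', List.reverse_range']
    simp
    rw [List.range_eq_range']
  apply List.reverse_injective
  rw [List.reverse_reverse, ← List.map_reverse, ← List.filter_reverse, hrev,
    List.filter_map, List.map_map]
  rw [List.filter_congr (q := fun i => decide (i < k) && p i) ?_]
  · rw [List.map_congr_left (g := f ∘ (fun i => i)) ?_]
    · rw [List.range_add, List.filter_append, List.map_append, List.filter_map]
      rw [List.filter_congr (q := p) (l := List.range k) ?_]
      · rw [List.filter_congr (q := fun _ => false) (l := List.range d) ?_]
        · simp
        · intro x hx
          simp only [Function.comp_apply, Bool.and_eq_false_iff, decide_eq_false_iff_not]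
          left
          omega
      · intro i hi
        rw [List.mem_range] at hi
        simp [hi]
    · intro i hi
      rw [List.mem_filter, List.mem_range] at hi
      simp only [Function.comp_apply]
      congr 1
      omega
  · intro i hi
    rw [List.mem_range] at hi
    simp only [Function.comp_apply]
    have h1 : k + d - 1 - (k + d - 1 - i) = i := by omega
    rw [h1]

-- access/length on a map over pyRange, and the padded-reversed-column entry
theorem length_map_pyRange {β : Type} (f : Int → β) (M : Nat) :
    ((PySem.List.pyRange 0 (M : Int) 1).map f).length = M := by
  rw [PySem.List.pyRange_zero_natCast, List.map_map, List.length_map, List.length_range]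

theorem pyGet?_map_pyRange {β : Type} (f : Int → β) (M t : Nat) (ht : t < M) :
    PySem.List.pyGet? ((PySem.List.pyRange 0 (M : Int) 1).map f) ((t : Nat) : Int) =
      some (f ((t : Nat) : Int)) := by
  rw [PySem.List.pyGet?_natCast, PySem.List.pyRange_zero_natCast, List.map_map,
    List.getElem?_map, List.getElem?_range ht]
  rfl

theorem pad_rev_get {β : Type} (M t : Nat) (l : List β) (hk : l.length ≤ M) (ht : t < M) :
    (List.replicate (M - l.length) (none : Option β) ++ (l.map some).reverse).getD t none
      = l[M - 1 - t]? := by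
  rw [List.getD_eq_getElem?_getD, List.getElem?_append]
  split
  · rename_i hlt
    rw [List.length_replicate] at hlt
    rw [List.getElem?_replicate, if_pos (by omega)]
    rw [List.getElem?_eq_none (by omega)]
    rfl
  · rename_i hge
    rw [List.length_replicate] at hge ⊢
    have hi : t - (M - l.length) < (l.map some).length := by
      rw [List.length_map]; omega
    rw [List.getElem?_reverse hi, List.length_map, List.getElem?_map]
    have : l.length - 1 - (t - (M - l.length)) = M - 1 - t := by omega
    rw [this, List.getElem?_eq_getElem (by omega)]
    rfl

theorem gB_map (f : Int → List (Option Char)) (N cidx : Nat) (h : cidx < N) (r : Int) :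
    gB ((PySem.List.pyRange 0 ((N : Nat) : Int) 1).map f) ((cidx : Nat) : Int) r =
      PySem.List.pyGetD (f ((cidx : Nat) : Int)) r none := by
  unfold gB
  rw [PySem.List.pyGetD_map_pyRange _ N cidx _ h]

theorem gB_growI (m n : Int) (arr : List (List Char)) (r c : Int)
    (hr0 : 0 ≤ r) (hrm : r < m) (hc0 : 0 ≤ c) (hcn : c < n) :
    gB (growI m n arr) r c = cellI m arr r c := by
  unfold growI
  exact gB_map_map m n _ r c hr0 hrm hc0 hcn

theorem mem_marksB_pair (m n : Int) (arr : List (List Char)) (grid : List (List (Option Char)))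
    (hInv : InvI m n arr grid) (r c : Int) :
    ((r, c) ∈ marksB m n grid ↔ (c, m - 1 - r) ∈ marksA arr) := by
  rw [mem_marksB_iff_phi m n arr grid hInv]
  constructor
  · rintro ⟨q, hq, heq⟩
    unfold phi at heq
    rw [Prod.ext_iff] at heq
    obtain ⟨h1, h2⟩ := heq
    have : q = (c, m - 1 - r) := by
      rw [Prod.ext_iff]
      constructor
      · exact h2.symm
      · simp only at h1 ⊢; omega
    rwa [this] at hq
  · intro h
    refine ⟨(c, m - 1 - r), h, ?_⟩
    unfold phi
    rw [Prod.ext_iff]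
    constructor
    · simp only; omega
    · rfl

theorem kept_core (m : Int) (arr : List (List Char)) (vis : PySem.Set (Int × Int)) (c : Int)
    (M k : Nat) (hM : m = (M : Int)) (hkA : kA arr c = (k : Int)) (hk : k ≤ M)
    (bl : Int → Option Char)
    (hbl : ∀ r : Int, 0 ≤ r → r < m →
      bl r = if (c, m - 1 - r) ∈ vis then none else cellI m arr r c) :
    ((PySem.List.pyRange 0 m 1).filter (fun r => decide (bl r ≠ none))).map (fun r => bl r)
      = ((((PySem.List.pyRange 0 (kA arr c) 1).filter (fun j => decide ((c, j) ∉ vis))).map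
          (fun j => chA arr c j)).map some).reverse := by
  subst hM
  have hq : ∀ x ∈ List.range M,
      (decide (bl ((x : Nat) : Int) ≠ none)) =
        (decide (M - 1 - x < k) && decide ((c, ((M - 1 - x : Nat) : Int)) ∉ vis)) := by
    intro r hr
    rw [List.mem_range] at hr
    have hcast : ((M : Nat) : Int) - 1 - ((r : Nat) : Int) = ((M - 1 - r : Nat) : Int) := by
      omega
    rw [hbl ((r : Nat) : Int) (by omega) (by exact_mod_cast hr)]
    by_cases hv : ((c, ((M - 1 - r : Nat) : Int)) ∈ vis)
    · rw [hcast, if_pos hv]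
      simp [hv]
    · rw [hcast, if_neg hv]
      have hiff : (cellI ((M : Nat) : Int) arr ((r : Nat) : Int) c ≠ none) ↔ (M - 1 - r < k) := by
        rw [cellI_ne_none_iff ((M : Nat) : Int) arr ((r : Nat) : Int) c (by omega), hkA, hcast]
        exact Nat.cast_lt
      simp [hv, hiff]
  have hg : ∀ x ∈ (List.range M).filter (fun r => decide (M - 1 - r < k) &&
      decide ((c, ((M - 1 - r : Nat) : Int)) ∉ vis)),
      bl ((x : Nat) : Int) = some (chA arr c ((M - 1 - x : Nat) : Int)) := by
    intro r hr
    rw [List.mem_filter, List.mem_range] at hr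
    obtain ⟨hrM, hpred⟩ := hr
    rw [Bool.and_eq_true, decide_eq_true_eq, decide_eq_true_eq] at hpred
    obtain ⟨hlt, hnv⟩ := hpred
    have hcast : ((M : Nat) : Int) - 1 - ((r : Nat) : Int) = ((M - 1 - r : Nat) : Int) := by
      omega
    rw [hbl ((r : Nat) : Int) (by omega) (by exact_mod_cast hrM), hcast, if_neg hnv]
    rw [cellI_char _ _ _ _ (by omega) (by rw [hkA]; omega)]
    rw [hcast]
  rw [PySem.List.pyRange_zero_natCast, List.filter_map, List.map_map]
  simp only [Function.comp_def]
  rw [List.filter_congr (fun a ha => hq a ha)]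
  rw [List.map_congr_left (fun a ha => hg a ha)]
  rw [rev_filter_range M k hk (fun j => decide ((c, ((j : Nat) : Int)) ∉ vis))
    (fun j => some (chA arr c ((j : Nat) : Int)))]
  rw [hkA, PySem.List.pyRange_zero_natCast, List.filter_map, List.map_map, List.map_map]
  rfl

-- one simulation step preserves the invariant
theorem step_preserves (m n : Int) (arr : List (List Char)) (grid : List (List (Option Char)))
    (hm : 0 < m) (hn : 0 < n) (hInv : InvI m n arr grid) :
    InvI m n (removeA arr (marksA arr)) (stepB m n grid (marksB m n grid)) := by
  obtain ⟨hlen, hcols, hgrid⟩ := hInv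
  have hmC : m = ((m.toNat : Nat) : Int) := by omega
  have hnC : n = ((n.toNat : Nat) : Int) := by omega
  have hlenN : (arr.length : Int) = ((n.toNat : Nat) : Int) := by omega
  refine ⟨?_, ?_, ?_⟩
  · rw [removeA_eq, hlenN, length_map_pyRange]
    omega
  · intro col hcol
    rw [removeA_eq] at hcol
    obtain ⟨y, hy, rfl⟩ := List.mem_map.mp hcol
    rw [hlenN, PySem.List.pyRange_zero_natCast] at hy
    obtain ⟨yN, hyN, rfl⟩ := List.mem_map.mp hy
    rw [List.mem_range] at hyN
    have hky : kA arr ((yN : Nat) : Int) ≤ m :=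
      kA_le m n arr grid ⟨hlen, hcols, hgrid⟩ _ (by omega) (by omega)
    have hkpos : 0 ≤ kA arr ((yN : Nat) : Int) := by unfold kA; omega
    have h2 : (PySem.List.pyRange 0 (kA arr ((yN : Nat) : Int)) 1).length =
        (kA arr ((yN : Nat) : Int)).toNat := by
      rw [show kA arr ((yN : Nat) : Int) = (((kA arr ((yN : Nat) : Int)).toNat : Nat) : Int)
        from by omega, PySem.List.pyRange_zero_natCast, List.length_map, List.length_range]
      omega
    have h1 := List.length_filter_le
      (fun j => decide ((((yN : Nat) : Int), j) ∉ marksA arr)) (PySem.List.pyRange 0 (kA arr ((yN : Nat) : Int)) 1)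
    rw [List.length_map]
    omega
  · -- the new grid is the abstraction of the new columns
    simp only [stepB]
    rw [PySem.List.foldl_append_singleton_eq_map, List.nil_append]
    unfold growI
    refine List.map_congr_left ?_
    intro r hr
    refine List.map_congr_left ?_
    intro c hc
    rw [PySem.List.mem_pyRange_one] at hr hc
    obtain ⟨cN, rfl⟩ : ∃ cN : Nat, c = (cN : Int) := ⟨c.toNat, by omega⟩
    obtain ⟨rN, rfl⟩ : ∃ rN : Nat, r = (rN : Int) := ⟨r.toNat, by omega⟩
    have hkc : 0 ≤ kA arr ((cN : Nat) : Int) := by unfold kA; omega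
    obtain ⟨k, hkA⟩ : ∃ k : Nat, kA arr ((cN : Nat) : Int) = (k : Int) :=
      ⟨(kA arr ((cN : Nat) : Int)).toNat, by omega⟩
    have hkM : k ≤ m.toNat := by
      have := kA_le m n arr grid ⟨hlen, hcols, hgrid⟩ ((cN : Nat) : Int) (by omega) (by omega)
      omega
    -- left side: entry (rN) of gravity column cN
    rw [show (PySem.List.pyRange 0 n 1) = (PySem.List.pyRange 0 ((n.toNat : Nat) : Int) 1)
      from by rw [← hnC]]
    rw [gB_map _ n.toNat cN (by omega) ((rN : Nat) : Int)]
    rw [kept_core m arr (marksA arr) ((cN : Nat) : Int) m.toNat k hmC hkA hkM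
      (fun r => gB ((PySem.List.pyRange 0 m 1).map (fun r =>
        (PySem.List.pyRange 0 ((n.toNat : Nat) : Int) 1).map (fun c =>
          if (r, c) ∈ marksB m n grid then none else gB grid r c))) r ((cN : Nat) : Int)) ?_]
    · -- compute the padded column entry
      rw [List.length_reverse, List.length_map, PySem.List.pyRepeat_singleton]
      have hL : (((PySem.List.pyRange 0 (kA arr ((cN : Nat) : Int)) 1).filter
          (fun j => decide ((((cN : Nat) : Int), j) ∉ marksA arr))).map
          (fun j => chA arr ((cN : Nat) : Int) j)).length ≤ m.toNat := by
        rw [List.length_map]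
        have h1 := List.length_filter_le
          (fun j => decide ((((cN : Nat) : Int), j) ∉ marksA arr))
          (PySem.List.pyRange 0 (kA arr ((cN : Nat) : Int)) 1)
        have h2 : (PySem.List.pyRange 0 (kA arr ((cN : Nat) : Int)) 1).length = k := by
          rw [hkA, PySem.List.pyRange_zero_natCast, List.length_map, List.length_range]
        omega
      rw [show (m - ((((PySem.List.pyRange 0 (kA arr ((cN : Nat) : Int)) 1).filter
          (fun j => decide ((((cN : Nat) : Int), j) ∉ marksA arr))).map
          (fun j => chA arr ((cN : Nat) : Int) j)).length : Int)).toNat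
        = m.toNat - (((PySem.List.pyRange 0 (kA arr ((cN : Nat) : Int)) 1).filter
          (fun j => decide ((((cN : Nat) : Int), j) ∉ marksA arr))).map
          (fun j => chA arr ((cN : Nat) : Int) j)).length from by omega]
      rw [PySem.List.pyGetD_natCast, pad_rev_get m.toNat rN _ hL (by omega)]
      -- right side: cellI of the removed columns
      unfold cellI
      rw [removeA_eq, hlenN, PySem.List.pyGetD_map_pyRange _ n.toNat cN _ (by omega)]
      rw [show m - 1 - ((rN : Nat) : Int) = (((m.toNat - 1 - rN : Nat) : Nat) : Int) from by omega]
      rw [PySem.List.pyGet?_natCast]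
    · -- the blanked grid accessed inside column cN
      intro r hr0 hrm
      dsimp only
      rw [gB_map_map m ((n.toNat : Nat) : Int) _ r ((cN : Nat) : Int) hr0 hrm (by omega)
        (by omega)]
      simp only [mem_marksB_pair m n arr grid ⟨hlen, hcols, hgrid⟩ r ((cN : Nat) : Int)]
      rw [hgrid, gB_growI m n arr r ((cN : Nat) : Int) hr0 hrm (by omega) (by omega)]

-- the invariant holds initially
theorem init_inv (m : Int) (n : Int) (board : List String) (hm : 0 < m) (hn : 0 < n)
    (hpre : Pre_solution m n board) :
    InvI m n (buildA m n board) (buildB m n board) := by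
  have hA : buildA m n board = (PySem.List.pyRange 0 n 1).map (fun x =>
      (PySem.List.pyRange 0 m 1).map (fun y =>
        (PySem.Str.pyGet? (PySem.List.pyGetD board (m - y - 1) "") x).getD ' ')) := by
    unfold buildA
    rw [PySem.List.foldl_append_singleton_eq_map, List.nil_append]
    refine List.map_congr_left ?_
    intro x _
    rw [PySem.List.foldl_append_singleton_eq_map, List.nil_append]
  obtain ⟨hb, hrow⟩ := hpre hm hn
  have hmC : m = ((m.toNat : Nat) : Int) := by omega
  have hnC : n = ((n.toNat : Nat) : Int) := by omega
  refine ⟨?_, ?_, ?_⟩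
  · rw [hA, hnC, length_map_pyRange]
  · intro col hcol
    rw [hA] at hcol
    obtain ⟨x, _, rfl⟩ := List.mem_map.mp hcol
    rw [hmC, length_map_pyRange]
  · unfold buildB growI
    refine List.map_congr_left ?_
    intro r hr
    rw [PySem.List.mem_pyRange_one] at hr
    have hrN : r = ((r.toNat : Nat) : Int) := by omega
    have hrb : r.toNat < board.length := by omega
    have hs : PySem.List.pyGetD board r "" = board[r.toNat] :=
      PySem.List.pyGetD_eq_getElem board "" hr.1 (by omega)
    have hsn : n ≤ ((board[r.toNat]).toList.length : Int) := by
      have h1 : r.toNat < (board.take m.toNat).length := by rw [List.length_take]; omega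
      have h2 := hrow _ (List.getElem_mem h1)
      rw [List.getElem_take] at h2
      exact h2
    rw [hs, PySem.List.slice_to _ (by omega : (0:Int) ≤ n)]
    refine List.ext_getElem ?_ ?_
    · rw [List.length_map, List.length_take, hnC, length_map_pyRange]
      omega
    · intro j h1 h2
      have hjn : j < n.toNat := by
        rw [List.length_map, List.length_take] at h1
        omega
      rw [List.getElem_map]
      -- right side: entry j of the growI row
      have h3 : ((PySem.List.pyRange 0 n 1).map
          (fun c => cellI m (buildA m n board) r c))[j]? =
          some (cellI m (buildA m n board) r ((j : Nat) : Int)) := by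
        rw [← PySem.List.pyGet?_natCast, hnC]
        exact pyGet?_map_pyRange _ n.toNat j hjn
      rw [List.getElem?_eq_getElem h2, Option.some_inj] at h3
      rw [h3]
      -- now compute cellI at (r, j)
      unfold cellI
      rw [hA]
      have hcol : PySem.List.pyGetD ((PySem.List.pyRange 0 n 1).map (fun x =>
          (PySem.List.pyRange 0 m 1).map (fun y =>
            (PySem.Str.pyGet? (PySem.List.pyGetD board (m - y - 1) "") x).getD ' '))) ((j : Nat) : Int) [] =
          (PySem.List.pyRange 0 m 1).map (fun y =>
            (PySem.Str.pyGet? (PySem.List.pyGetD board (m - y - 1) "") ((j : Nat) : Int)).getD ' ') := by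
        rw [hnC]
        exact PySem.List.pyGetD_map_pyRange _ n.toNat j _ hjn
      rw [hcol]
      obtain ⟨t, ht'⟩ : ∃ t : Nat, m - 1 - r = (t : Int) := ⟨(m - 1 - r).toNat, by omega⟩
      rw [ht', hmC, pyGet?_map_pyRange _ m.toNat t (by omega)]
      have hyr : ((m.toNat : Nat) : Int) - ((t : Nat) : Int) - 1 = r := by omega
      rw [hyr, hs, PySem.Str.pyGet?_natCast]
      rw [List.getElem?_eq_getElem (by omega), Option.getD_some, List.getElem_take]

-- the two loops agree under the invariant
theorem loop_eq (m n : Int) (hm : 0 < m) (hn : 0 < n) :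
    ∀ (fuel : Nat) (arr : List (List Char)) (grid : List (List (Option Char))) (acc : Int),
      InvI m n arr grid → loopA fuel arr acc = loopB m n fuel grid acc := by
  intro fuel
  induction fuel with
  | zero => intro arr grid acc _; rfl
  | succ f ih =>
    intro arr grid acc hInv
    have hnil := marksB_nil_iff m n arr grid hInv
    have hlenM := marksB_length m n arr grid hInv
    by_cases h : marksA arr = []
    · simp only [loopA, loopB, h, hnil.mpr h, if_true, ite_true]
    · have h2 : marksB m n grid ≠ [] := fun hh => h (hnil.mp hh)
      simp only [loopA, loopB, if_neg h, if_neg h2, hlenM]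
      exact ih _ _ _ (step_preserves m n arr grid hm hn hInv)

-- degenerate sizes: A returns 0
theorem solution_degenerate (m n : Int) (board : List String) (h : m ≤ 0 ∨ n ≤ 0) :
    solution m n board = 0 := by
  unfold solution
  have hmarks : marksA (buildA m n board) = [] := by
    rw [List.eq_nil_iff_forall_not_mem]
    intro p hp
    rw [mem_marksA] at hp
    obtain ⟨y, x, ⟨h1, h2, h3, h4, h5, h6, h7, h8⟩, hm⟩ := hp
    unfold buildA at h2 h4
    rw [PySem.List.foldl_append_singleton_eq_map] at h2 h4
    rcases h with hm0 | hn0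
    · -- every column is empty
      rw [List.nil_append, List.map_congr_left (g := fun _ => ([] : List Char))
        (fun a _ => by
          rw [PySem.List.foldl_append_singleton_eq_map, List.nil_append]
          have : PySem.List.pyRange 0 m 1 = [] := by
            rw [List.eq_nil_iff_forall_not_mem]
            intro z hz
            rw [PySem.List.mem_pyRange_one] at hz
            omega
          rw [this, List.map_nil]),
        List.map_const'] at h4
      rw [PySem.List.pyGetD_of_nonneg _ _ h1, List.getD_eq_getElem?_getD,
        List.getElem?_replicate] at h4
      split at h4 <;> simp at h4 <;> omega
    · -- there are no columns at all
      have : PySem.List.pyRange 0 n 1 = [] := by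
        rw [List.eq_nil_iff_forall_not_mem]
        intro z hz
        rw [PySem.List.mem_pyRange_one] at hz
        omega
      rw [List.nil_append, this, List.map_nil] at h2
      simp at h2
      omega
  simp only [loopA, hmarks, if_true, ite_true]

-- ===== VERDICT (by name: the statement is the Claim_ definition above) =====
theorem solution_spec : Claim_equal_solution := by
  intro m n board _ hpre
  unfold Spec_solution solution_alt
  by_cases h : m ≤ 0 ∨ n ≤ 0
  · rw [if_pos h, solution_degenerate m n board h]
  · push_neg at h
    rw [if_neg (by omega)]
    exact loop_eq m n h.1 h.2 _ _ _ _ (init_inv m n board h.1 h.2 hpre)
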